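-- pv_equiv track=rewrite | github.com/StUnTmAkEr/Aetherra | Aetherra/tools/memory_analyzer.py | cluster_memories
-- ===== SOURCE A (Python) =====
-- from typing import Dict, List
--
-- def cluster_memories(
--     memories: List[Dict], max_clusters: int = 5
-- ) -> Dict[str, List[Dict]]:
--     """Simple clustering of memories by similarity"""
--
--     if not memories:
--         return {}
--
--     # Simple keyword-based clustering
--     clusters = {}
--
--     for memory in memories:
--         content = memory.get("content", memory.get("text", "")).lower()
--
--         # Find best cluster or create new one
--         best_cluster = None
--         best_score = 0
--
--         for cluster_name, cluster_memories in clusters.items():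
--             # Simple similarity based on common words
--             cluster_content = " ".join(
--                 [
--                     m.get("content", m.get("text", "")).lower()
--                     for m in cluster_memories
--                 ]
--             )
--
--             common_words = len(set(content.split()) & set(cluster_content.split()))
--             if common_words > best_score:
--                 best_score = common_words
--                 best_cluster = cluster_name
--
--         # Add to best cluster or create new one
--         if best_cluster and best_score > 2:
--             clusters[best_cluster].append(memory)
--         else:
--             # Create new cluster
--             category = memory.get("category", "general")
--             cluster_key = f"{category}_{len(clusters)}"
--             clusters[cluster_key] = [memory]
--
--     return clusters
-- ===== SOURCE B (Python) =====
-- from typing import Dict, List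
--
--
-- def cluster_memories(
--     memories: List[Dict], max_clusters: int = 5
-- ) -> Dict[str, List[Dict]]:
--     """Greedy keyword clustering via one dict key -> (members, aggregated word set);
--     the target cluster is picked by max over a score list instead of a running best,
--     so no member content is ever re-joined or re-split."""
--     clusters = {}
--     for memory in memories:
--         words = set(memory.get("content", memory.get("text", "")).lower().split())
--         names = list(clusters)
--         scores = [len(words & mw[1]) for mw in clusters.values()]
--         best = max(scores, default=0)
--         if best > 2:
--             name = names[scores.index(best)]
--             members, ws = clusters[name]
--             clusters[name] = (members + [memory], ws | words)
--         else:
--             clusters[f"{memory.get('category', 'general')}_{len(clusters)}"] = ([memory], words)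
--     return {name: mw[0] for name, mw in clusters.items()}
-- ===== Notes on version B (the rewrite author's own statement) =====
-- stated objective: faster
-- what changed: B keeps one dict mapping each cluster key to (members, incrementally aggregated word set) and picks the target cluster by taking the max of a score list (then its first index), instead of A's re-joining and re-splitting of every member's content inside a running-best inner loop.
import Mathlib
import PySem

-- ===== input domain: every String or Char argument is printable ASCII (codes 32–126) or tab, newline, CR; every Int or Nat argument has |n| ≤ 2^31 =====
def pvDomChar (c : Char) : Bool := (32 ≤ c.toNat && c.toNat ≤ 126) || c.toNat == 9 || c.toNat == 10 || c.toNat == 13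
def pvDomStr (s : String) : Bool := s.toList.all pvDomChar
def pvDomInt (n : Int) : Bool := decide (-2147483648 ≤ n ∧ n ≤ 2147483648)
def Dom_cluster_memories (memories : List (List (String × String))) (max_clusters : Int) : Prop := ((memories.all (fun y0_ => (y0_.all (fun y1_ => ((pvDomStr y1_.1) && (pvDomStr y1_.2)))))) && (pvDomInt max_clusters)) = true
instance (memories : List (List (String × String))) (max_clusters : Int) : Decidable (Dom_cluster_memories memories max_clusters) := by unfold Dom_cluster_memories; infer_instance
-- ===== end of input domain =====

-- B keeps one dict mapping cluster key to (members, aggregated word set) and picks the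
-- target cluster as the max of a score list, instead of A's re-join/re-split of all
-- member contents and running-best inner loop (objective: faster).

-- ===== PORT A =====
-- memory.get("content", memory.get("text", "")).lower()  (identical expression in both Pythons)
def memContent (memory : List (String × String)) : String :=
  PySem.Str.lower ((PySem.Dict.mk memory).getD "content" ((PySem.Dict.mk memory).getD "text" ""))

-- f"{category}_{len(clusters)}"  (identical expression in both Pythons)
def newKey (memory : List (String × String)) (nclusters : Nat) : String :=
  ((PySem.Dict.mk memory).getD "category" "general") ++ "_" ++ PySem.Int.toStr (nclusters : Int)

-- A's inner 'for cluster_name, cluster_memories in clusters.items()' scan: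
-- running (best_cluster, best_score)
def bestA (clusters : PySem.Dict String (List (List (String × String))))
    (memory : List (String × String)) : Option String × Int :=
  clusters.items.foldl
    (fun (b : Option String × Int) kv =>
      let cluster_content := PySem.Str.join " " (kv.2.map memContent)
      let common_words : Int := PySem.Set.len (PySem.Set.inter
        (PySem.Set.ofList (PySem.Str.split₀ (memContent memory)))
        (PySem.Set.ofList (PySem.Str.split₀ cluster_content)))
      if common_words > b.2 then (some kv.1, common_words) else b)
    (none, 0)

-- body of A's outer 'for memory in memories' loop
def stepA (clusters : PySem.Dict String (List (List (String × String))))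
    (memory : List (String × String)) : PySem.Dict String (List (List (String × String))) :=
  match bestA clusters memory with
  | (some name, score) =>
    -- 'if best_cluster and best_score > 2' (a nonempty best_cluster string is truthy)
    if name ≠ "" ∧ score > 2 then clusters.modify name [] (fun ms => ms ++ [memory])
    else clusters.insert (newKey memory clusters.items.length) [memory]
  | (none, _) => clusters.insert (newKey memory clusters.items.length) [memory]

def cluster_memories (memories : List (List (String × String))) (_max_clusters : Int) :
    List (String × List (List (String × String))) :=
  if memories.isEmpty then []
  else (memories.foldl stepA PySem.Dict.empty).items

-- ===== PORT B =====
-- body of B's loop over memories; one dict: key ↦ (members, aggregated word set)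
def stepB (clusters : PySem.Dict String (List (List (String × String)) × PySem.Set String))
    (memory : List (String × String)) :
    PySem.Dict String (List (List (String × String)) × PySem.Set String) :=
  let words := PySem.Set.ofList (PySem.Str.split₀ (memContent memory))
  let names := clusters.keys
  let scores := clusters.values.map (fun mw => PySem.Set.len (PySem.Set.inter words mw.2))
  let best := PySem.List.maxD scores (fun x => x) 0
  if best > 2 then
    -- scores.index(best) cannot raise here (best > 2 forces best ∈ scores) and the
    -- resulting index is < len(names), so the getD defaults are never taken: exact
    let name := names.getD ((PySem.List.index? scores best).getD 0) ""
    let p := clusters.getD name ([], PySem.Set.empty)  -- clusters[name]; name ∈ keys, no KeyError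
    clusters.insert name (p.1 ++ [memory], PySem.Set.union p.2 words)
  else
    clusters.insert (newKey memory clusters.items.length) ([memory], words)

-- B's 'for memory in memories' loop as structural recursion
def goB (rest : List (List (String × String)))
    (clusters : PySem.Dict String (List (List (String × String)) × PySem.Set String)) :
    PySem.Dict String (List (List (String × String)) × PySem.Set String) :=
  match rest with
  | [] => clusters
  | memory :: rest => goB rest (stepB clusters memory)

-- final '{name: mw[0] for name, mw in clusters.items()}'
def cluster_memories_alt (memories : List (List (String × String))) (_max_clusters : Int) :
    List (String × List (List (String × String))) :=
  (goB memories PySem.Dict.empty).items.map (fun kv => (kv.1, kv.2.1))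

-- ===== PRECONDITION & SPEC =====
def Spec_cluster_memories (memories : List (List (String × String))) (max_clusters : Int) (out : List (String × List (List (String × String)))) : Prop := out = cluster_memories_alt memories max_clusters
instance (memories : List (List (String × String))) (max_clusters : Int) (out : List (String × List (List (String × String)))) : Decidable (Spec_cluster_memories memories max_clusters out) := by unfold Spec_cluster_memories; infer_instance

-- ===== CLAIM (what is proved, stated in full; the proofs are below) =====
def Claim_equal_cluster_memories : Prop := ∀ (memories : List (List (String × String))) (max_clusters : Int), Dom_cluster_memories memories max_clusters → Spec_cluster_memories memories max_clusters (cluster_memories memories max_clusters)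

-- ===== LEMMAS AND PROOFS =====

-- ---- split₀ distributes over a single-space join ----
theorem go_nil (cur : List Char) (acc : List (List Char)) :
    PySem.Chars.split₀.go [] cur acc
      = if cur.isEmpty then acc.reverse else (cur.reverse :: acc).reverse := by
  rw [PySem.Chars.split₀.go]

theorem go_cons (c : Char) (rest cur : List Char) (acc : List (List Char)) :
    PySem.Chars.split₀.go (c :: rest) cur acc
      = if PySem.Chars.isspace c then
          (if cur.isEmpty then PySem.Chars.split₀.go rest [] acc
           else PySem.Chars.split₀.go rest [] (cur.reverse :: acc))
        else PySem.Chars.split₀.go rest (c :: cur) acc := by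
  rw [PySem.Chars.split₀.go]

theorem go_acc (s : List Char) : ∀ (cur : List Char) (acc : List (List Char)),
    PySem.Chars.split₀.go s cur acc = acc.reverse ++ PySem.Chars.split₀.go s cur [] := by
  induction s with
  | nil =>
    intro cur acc
    rw [go_nil, go_nil]
    by_cases h : cur.isEmpty <;> simp [h]
  | cons c rest ih =>
    intro cur acc
    rw [go_cons, go_cons]
    by_cases hc : PySem.Chars.isspace c
    · by_cases h : cur.isEmpty
      · simp only [hc, h, if_true]
        exact ih [] acc
      · simp only [hc, h, if_true, Bool.false_eq_true, if_false]
        rw [ih [] (cur.reverse :: acc), ih [] [cur.reverse]]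
        simp
    · simp only [hc, Bool.false_eq_true, if_false]
      exact ih (c :: cur) acc

theorem go_split (b : List Char) (c : Char) (hc : PySem.Chars.isspace c = true) :
    ∀ (s cur : List Char) (acc : List (List Char)),
    PySem.Chars.split₀.go (s ++ c :: b) cur acc
      = acc.reverse ++ PySem.Chars.split₀.go s cur [] ++ PySem.Chars.split₀.go b [] [] := by
  intro s
  induction s with
  | nil =>
    intro cur acc
    rw [List.nil_append, go_cons, hc, go_nil]
    by_cases h : cur.isEmpty
    · simp only [h, if_true]
      rw [go_acc b [] acc]
      simp
    · simp only [h, Bool.false_eq_true, if_false, if_true]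
      rw [go_acc b [] (cur.reverse :: acc)]
      simp
  | cons d s' ih =>
    intro cur acc
    rw [List.cons_append, go_cons, go_cons]
    by_cases hd : PySem.Chars.isspace d
    · by_cases h : cur.isEmpty
      · simp only [hd, h, if_true]
        exact ih [] acc
      · simp only [hd, h, if_true, Bool.false_eq_true, if_false]
        rw [ih [] (cur.reverse :: acc), go_acc s' [] [cur.reverse]]
        simp
    · simp only [hd, Bool.false_eq_true, if_false]
      exact ih (d :: cur) acc

theorem split₀_append_space (a b : List Char) (c : Char) (hc : PySem.Chars.isspace c = true) :
    PySem.Chars.split₀ (a ++ c :: b) = PySem.Chars.split₀ a ++ PySem.Chars.split₀ b := by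
  unfold PySem.Chars.split₀
  rw [go_split b c hc a [] []]
  simp

theorem chars_split₀_join (parts : List (List Char)) :
    PySem.Chars.split₀ (PySem.Chars.join [' '] parts) = parts.flatMap PySem.Chars.split₀ := by
  induction parts with
  | nil => rw [PySem.Chars.join_nil]; rfl
  | cons p rest ih =>
    cases rest with
    | nil =>
      rw [PySem.Chars.join_singleton]
      simp
    | cons q r =>
      rw [PySem.Chars.join_cons_cons]
      have h2 : p ++ [' '] ++ PySem.Chars.join [' '] (q :: r)
          = p ++ ' ' :: PySem.Chars.join [' '] (q :: r) := by simp
      rw [h2, split₀_append_space _ _ ' ' (by decide), ih]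
      simp

theorem str_split₀_join (parts : List String) :
    PySem.Str.split₀ (PySem.Str.join " " parts) = parts.flatMap PySem.Str.split₀ := by
  have h : List.map String.toList (PySem.Str.split₀ (PySem.Str.join " " parts))
      = List.map String.toList (parts.flatMap PySem.Str.split₀) := by
    rw [PySem.Str.split₀_map_toList, PySem.Str.toList_join]
    have hsep : (" " : String).toList = [' '] := by decide
    rw [hsep, chars_split₀_join, List.map_flatMap, List.flatMap_map]
    congr 1
    funext p
    exact (PySem.Str.split₀_map_toList p).symm
  exact List.map_injective_iff.mpr (fun x y hxy => String.toList_inj.mp hxy) h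

-- ---- scores only depend on the membership of the word collection ----
theorem len_inter_congr (s : PySem.Set String) (t t' : List String)
    (h : ∀ w, w ∈ t ↔ w ∈ t') :
    PySem.Set.len (PySem.Set.inter s t) = PySem.Set.len (PySem.Set.inter s t') := by
  unfold PySem.Set.len PySem.Set.inter
  congr 2
  apply List.filter_congr
  intro x _
  unfold PySem.Set.contains
  apply Bool.eq_iff_iff.mpr
  simp only [List.contains_iff_mem]
  exact h x

-- ---- characterisation of A's running-best loop as (max of scores, first argmax) ----
theorem maxD_append_singleton (xs : List Int) (s : Int) (h0 : 0 ≤ s) :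
    PySem.List.maxD (xs ++ [s]) (fun x => x) 0
      = max (PySem.List.maxD xs (fun x => x) 0) s := by
  cases xs with
  | nil =>
    simp only [List.nil_append, PySem.List.maxD, PySem.List.max?_id_cons, List.foldl_nil,
      Option.getD_some]
    have : PySem.List.max? ([] : List Int) (fun x => x) = none := rfl
    rw [this]
    simp
    omega
  | cons x t =>
    simp only [List.cons_append, PySem.List.maxD, PySem.List.max?_id_cons, Option.getD_some,
      List.foldl_append, List.foldl_cons, List.foldl_nil]

theorem maxD_mem_or (xs : List Int) :
    PySem.List.maxD xs (fun x => x) 0 = 0 ∨ PySem.List.maxD xs (fun x => x) 0 ∈ xs := by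
  cases hx : PySem.List.max? xs (fun x => x) with
  | none => left; simp [PySem.List.maxD, hx]
  | some m => right; simp only [PySem.List.maxD, hx, Option.getD_some]; exact PySem.List.max?_mem hx

theorem maxD_isMax (xs : List Int) (x : Int) (hx : x ∈ xs) :
    x ≤ PySem.List.maxD xs (fun x => x) 0 := by
  cases xs with
  | nil => exact absurd hx (List.not_mem_nil)
  | cons x0 t =>
    simp only [PySem.List.maxD, PySem.List.max?_id_cons, Option.getD_some]
    rcases List.mem_cons.mp hx with rfl | hxt
    · exact (PySem.List.le_foldl_max t x).1
    · exact (PySem.List.le_foldl_max t x0).2 x hxt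

theorem idxOf?_append_of_mem {l l' : List Int} {v : Int} (h : v ∈ l) :
    List.idxOf? v (l ++ l') = List.idxOf? v l := by
  rcases Option.isSome_iff_exists.mp (List.isSome_idxOf?.mpr h) with ⟨i, hi⟩
  rw [hi]
  rcases List.idxOf?_eq_some_iff.mp hi with ⟨hlt, hget, hmin⟩
  refine List.idxOf?_eq_some_iff.mpr ⟨by simp; omega, ?_, ?_⟩
  · rw [List.getElem_append_left hlt]; exact hget
  · intro j hj
    have hjl : j < l.length := by omega
    rw [List.getElem_append_left hjl]
    exact hmin j hj

theorem idxOf?_append_self {l : List Int} {v : Int} (h : v ∉ l) :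
    List.idxOf? v (l ++ [v]) = some l.length := by
  refine List.idxOf?_eq_some_iff.mpr ⟨by simp, ?_, ?_⟩
  · simp
  · intro j hj
    have hjl : j < l.length := hj
    rw [List.getElem_append_left hjl]
    intro hc
    exact h (hc ▸ List.getElem_mem hjl)

-- the shape of A's inner fold, abstracted over (name, score) pairs
def runBest (pairs : List (String × Int)) : Option String × Int :=
  pairs.foldl (fun b kv => if kv.2 > b.2 then (some kv.1, kv.2) else b) (none, 0)

def selOf (pairs : List (String × Int)) : Option String × Int :=
  let scores := pairs.map Prod.snd
  let best := PySem.List.maxD scores (fun x => x) 0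
  (if 0 < best then
      some ((pairs.map Prod.fst).getD ((PySem.List.index? scores best).getD 0) "")
    else none, best)

theorem runBest_char (pairs : List (String × Int)) (h : ∀ p ∈ pairs, 0 ≤ p.2) :
    runBest pairs = selOf pairs := by
  induction pairs using List.reverseRecOn with
  | nil => rfl
  | append_singleton pairs p ih =>
    have hp : 0 ≤ p.2 := h p (by simp)
    have hpre : ∀ q ∈ pairs, 0 ≤ q.2 := fun q hq => h q (by simp [hq])
    have ihe := ih hpre
    have hnn : 0 ≤ PySem.List.maxD (pairs.map Prod.snd) (fun x => x) 0 := by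
      rcases maxD_mem_or (pairs.map Prod.snd) with h0 | hmem
      · omega
      · rcases List.mem_map.mp hmem with ⟨q, hq, hqe⟩
        rw [← hqe]; exact hpre q hq
    unfold runBest at ihe ⊢
    rw [List.foldl_append, List.foldl_cons, List.foldl_nil, ihe]
    unfold selOf
    simp only [List.map_append, List.map_cons, List.map_nil]
    set M := PySem.List.maxD (pairs.map Prod.snd) (fun x => x) 0 with hM
    by_cases hgt : p.2 > M
    · -- new element strictly beats the old max
      have hbest : PySem.List.maxD (pairs.map Prod.snd ++ [p.2]) (fun x => x) 0 = p.2 := by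
        rw [maxD_append_singleton _ _ hp, ← hM]; omega
      have hnotmem : p.2 ∉ pairs.map Prod.snd := fun hc => absurd (maxD_isMax _ _ hc) (by omega)
      have hidx : PySem.List.index? (pairs.map Prod.snd ++ [p.2]) p.2
          = some (pairs.map Prod.snd).length := by
        unfold PySem.List.index?
        exact idxOf?_append_self hnotmem
      simp only [hbest, hidx, if_pos hgt]
      have hpos : 0 < p.2 := by omega
      rw [if_pos hpos]
      have hlen : (pairs.map Prod.snd).length = (pairs.map Prod.fst).length := by simp
      simp only [Option.getD_some, hlen, List.getD_eq_getElem?_getD]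
      rw [List.getElem?_append_right (by omega)]
      simp
    · -- old running best survives
      have hbest : PySem.List.maxD (pairs.map Prod.snd ++ [p.2]) (fun x => x) 0 = M := by
        rw [maxD_append_singleton _ _ hp, ← hM]; omega
      simp only [hbest, if_neg hgt]
      by_cases hpos : 0 < M
      · have hmem : M ∈ pairs.map Prod.snd := by
          rcases maxD_mem_or (pairs.map Prod.snd) with h0 | hmem
          · omega
          · exact hmem
        have hidx : PySem.List.index? (pairs.map Prod.snd ++ [p.2]) M
            = PySem.List.index? (pairs.map Prod.snd) M := by
          unfold PySem.List.index?
          exact idxOf?_append_of_mem hmem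
        rw [if_pos hpos, if_pos hpos, hidx]
        rcases Option.isSome_iff_exists.mp (List.isSome_idxOf?.mpr hmem) with ⟨i, hi⟩
        have hilt : i < (pairs.map Prod.snd).length := (List.idxOf?_eq_some_iff.mp hi).1
        unfold PySem.List.index?
        rw [hi]
        simp only [Option.getD_some]
        rw [List.getD_append _ _ _ i (by simpa using hilt)]
      · rw [if_neg hpos, if_neg hpos]

-- ---- the coupling invariant between A's dict and B's dict ----
def memWords (ms : List (List (String × String))) : List String :=
  (ms.map memContent).flatMap PySem.Str.split₀

def MemRel (a : String × List (List (String × String)))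
    (b : String × (List (List (String × String)) × PySem.Set String)) : Prop :=
  b.1 = a.1 ∧ a.1 ≠ "" ∧ b.2.1 = a.2 ∧ ∀ w : String, w ∈ b.2.2 ↔ w ∈ memWords a.2

theorem memWords_append (ms : List (List (String × String))) (m : List (String × String))
    (w : String) :
    w ∈ memWords (ms ++ [m]) ↔ w ∈ memWords ms ∨ w ∈ PySem.Str.split₀ (memContent m) := by
  unfold memWords
  simp

theorem memWords_singleton (m : List (String × String)) (w : String) :
    w ∈ memWords [m] ↔ w ∈ PySem.Str.split₀ (memContent m) := by
  unfold memWords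
  simp

theorem newKey_ne_empty (m : List (String × String)) (n : Nat) : newKey m n ≠ "" := by
  unfold newKey
  intro hc
  have := congrArg String.toList hc
  simp [String.toList_append] at this

theorem forall₂_contains {la : List (String × List (List (String × String)))}
    {lb : List (String × (List (List (String × String)) × PySem.Set String))}
    (h : List.Forall₂ MemRel la lb) (k : String) :
    la.any (fun p => p.1 == k) = lb.any (fun p => p.1 == k) := by
  induction h with
  | nil => rfl
  | cons hab _ ih => simp only [List.any_cons, hab.1, ih]

theorem forall₂_key_ne {la : List (String × List (List (String × String)))}
    {lb : List (String × (List (List (String × String)) × PySem.Set String))}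
    (h : List.Forall₂ MemRel la lb) (k : String) (hk : k ∈ lb.map Prod.fst) : k ≠ "" := by
  induction h with
  | nil => exact absurd hk (List.not_mem_nil)
  | cons hab _ ih =>
    rcases List.mem_cons.mp hk with heq | htail
    · rename_i a b _ _ _
      rw [heq, hab.1]
      exact hab.2.1
    · exact ih htail

theorem forall₂_find? {la : List (String × List (List (String × String)))}
    {lb : List (String × (List (List (String × String)) × PySem.Set String))}
    (h : List.Forall₂ MemRel la lb) (k : String) :
    ((Option.map (fun x => x.2) (lb.find? (fun p => p.1 == k))).getD ([], PySem.Set.empty)).1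
        = (Option.map (fun x => x.2) (la.find? (fun p => p.1 == k))).getD [] ∧
    ∀ w, w ∈ ((Option.map (fun x => x.2) (lb.find? (fun p => p.1 == k))).getD
          ([], PySem.Set.empty)).2
      ↔ w ∈ memWords ((Option.map (fun x => x.2) (la.find? (fun p => p.1 == k))).getD []) := by
  induction h with
  | nil =>
    refine ⟨rfl, fun w => ?_⟩
    simp [memWords, PySem.Set.empty]
  | cons hab _ ih =>
    rename_i a b _ _ _
    by_cases hk : a.1 == k
    · have hk' : b.1 == k := by rw [hab.1]; exact hk
      simp only [List.find?_cons, hk, hk', Option.map_some, Option.getD_some]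
      exact ⟨hab.2.2.1, hab.2.2.2⟩
    · have hk' : (b.1 == k) = false := by rw [hab.1]; simpa using hk
      simp only [List.find?_cons, hk, hk']
      exact ih

theorem getD_rel {clA : PySem.Dict String (List (List (String × String)))}
    {clB : PySem.Dict String (List (List (String × String)) × PySem.Set String)}
    (h : List.Forall₂ MemRel clA.items clB.items) (k : String) :
    (clB.getD k ([], PySem.Set.empty)).1 = clA.getD k [] ∧
    ∀ w, w ∈ (clB.getD k ([], PySem.Set.empty)).2 ↔ w ∈ memWords (clA.getD k []) := by
  unfold PySem.Dict.getD PySem.Dict.get?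
  exact forall₂_find? h k

theorem forall₂_overwrite {la : List (String × List (List (String × String)))}
    {lb : List (String × (List (List (String × String)) × PySem.Set String))}
    (h : List.Forall₂ MemRel la lb) (k : String) (hk : k ≠ "")
    (v : List (List (String × String))) (vb : List (List (String × String)) × PySem.Set String)
    (hv1 : vb.1 = v) (hv2 : ∀ w, w ∈ vb.2 ↔ w ∈ memWords v) :
    List.Forall₂ MemRel (la.map (fun p => if p.1 == k then (k, v) else p))
      (lb.map (fun p => if p.1 == k then (k, vb) else p)) := by
  induction h with
  | nil => exact List.Forall₂.nil
  | cons hab _ ih =>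
    rename_i a b _ _ _
    refine List.Forall₂.cons ?_ ih
    by_cases hke : a.1 == k
    · have hk' : b.1 == k := by rw [hab.1]; exact hke
      simp only [hke, hk', if_true]
      exact ⟨rfl, hk, hv1, hv2⟩
    · have hk' : (b.1 == k) = false := by rw [hab.1]; simpa using hke
      simp only [hke, hk', Bool.false_eq_true, if_false]
      exact hab

theorem forall₂_snoc {la : List (String × List (List (String × String)))}
    {lb : List (String × (List (List (String × String)) × PySem.Set String))}
    (h : List.Forall₂ MemRel la lb) (k : String) (hk : k ≠ "")
    (v : List (List (String × String))) (vb : List (List (String × String)) × PySem.Set String)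
    (hv1 : vb.1 = v) (hv2 : ∀ w, w ∈ vb.2 ↔ w ∈ memWords v) :
    List.Forall₂ MemRel (la ++ [(k, v)]) (lb ++ [(k, vb)]) := by
  induction h with
  | nil => exact List.Forall₂.cons ⟨rfl, hk, hv1, hv2⟩ List.Forall₂.nil
  | cons hab _ ih => exact List.Forall₂.cons hab ih

theorem forall₂_insert {clA : PySem.Dict String (List (List (String × String)))}
    {clB : PySem.Dict String (List (List (String × String)) × PySem.Set String)}
    (h : List.Forall₂ MemRel clA.items clB.items) (k : String) (hk : k ≠ "")
    (v : List (List (String × String))) (vb : List (List (String × String)) × PySem.Set String)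
    (hv1 : vb.1 = v) (hv2 : ∀ w, w ∈ vb.2 ↔ w ∈ memWords v) :
    List.Forall₂ MemRel (clA.insert k v).items (clB.insert k vb).items := by
  unfold PySem.Dict.insert PySem.Dict.contains
  rw [forall₂_contains h k]
  by_cases hc : clB.items.any (fun p => p.1 == k)
  · rw [if_pos hc, if_pos hc]
    exact forall₂_overwrite h k hk v vb hv1 hv2
  · rw [if_neg hc, if_neg hc]
    exact forall₂_snoc h k hk v vb hv1 hv2

theorem pairs_eq (memory : List (String × String))
    {la : List (String × List (List (String × String)))}
    {lb : List (String × (List (List (String × String)) × PySem.Set String))}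
    (h : List.Forall₂ MemRel la lb) :
    la.map (fun kv => (kv.1, PySem.Set.len (PySem.Set.inter
        (PySem.Set.ofList (PySem.Str.split₀ (memContent memory)))
        (PySem.Set.ofList (PySem.Str.split₀ (PySem.Str.join " " (kv.2.map memContent)))))))
      = lb.map (fun kv => (kv.1, PySem.Set.len (PySem.Set.inter
        (PySem.Set.ofList (PySem.Str.split₀ (memContent memory))) kv.2.2))) := by
  induction h with
  | nil => rfl
  | cons hab _ ih =>
    rename_i a b _ _ _
    simp only [List.map_cons, ih]
    have hscore : PySem.Set.len (PySem.Set.inter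
        (PySem.Set.ofList (PySem.Str.split₀ (memContent memory)))
        (PySem.Set.ofList (PySem.Str.split₀ (PySem.Str.join " " (a.2.map memContent)))))
        = PySem.Set.len (PySem.Set.inter
          (PySem.Set.ofList (PySem.Str.split₀ (memContent memory))) b.2.2) := by
      apply len_inter_congr
      intro w
      rw [PySem.Set.mem_ofList, str_split₀_join]
      exact (hab.2.2.2 w).symm
    simp only [hscore, hab.1]

set_option maxHeartbeats 1600000 in
theorem step_coupled (clA : PySem.Dict String (List (List (String × String))))
    (clB : PySem.Dict String (List (List (String × String)) × PySem.Set String))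
    (memory : List (String × String))
    (h : List.Forall₂ MemRel clA.items clB.items) :
    List.Forall₂ MemRel (stepA clA memory).items ((stepB clB memory)).items := by
  have hb : bestA clA memory = selOf (clB.items.map (fun kv =>
      (kv.1, PySem.Set.len (PySem.Set.inter
        (PySem.Set.ofList (PySem.Str.split₀ (memContent memory))) kv.2.2)))) := by
    have h1 : bestA clA memory = runBest (clA.items.map (fun kv =>
        (kv.1, PySem.Set.len (PySem.Set.inter
          (PySem.Set.ofList (PySem.Str.split₀ (memContent memory)))
          (PySem.Set.ofList (PySem.Str.split₀
            (PySem.Str.join " " (kv.2.map memContent)))))))) := by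
      unfold bestA runBest
      rw [List.foldl_map]
    rw [h1, pairs_eq memory h]
    apply runBest_char
    intro p hp
    rcases List.mem_map.mp hp with ⟨kv, _, hkv⟩
    rw [← hkv]
    exact Int.natCast_nonneg _
  have hsc : (clB.items.map (fun kv =>
      (kv.1, PySem.Set.len (PySem.Set.inter
        (PySem.Set.ofList (PySem.Str.split₀ (memContent memory))) kv.2.2)))).map Prod.snd
      = clB.values.map (fun mw => PySem.Set.len (PySem.Set.inter
        (PySem.Set.ofList (PySem.Str.split₀ (memContent memory))) mw.2)) := by
    unfold PySem.Dict.values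
    rw [List.map_map, List.map_map]
    rfl
  have hnm : (clB.items.map (fun kv =>
      (kv.1, PySem.Set.len (PySem.Set.inter
        (PySem.Set.ofList (PySem.Str.split₀ (memContent memory))) kv.2.2)))).map Prod.fst
      = clB.keys := by
    unfold PySem.Dict.keys
    rw [List.map_map]
    exact List.map_congr_left (fun x _ => rfl)
  have hlen : clA.items.length = clB.items.length := h.length_eq
  unfold stepA stepB
  rw [hb]
  unfold selOf
  simp only [hsc, hnm]
  set words := PySem.Set.ofList (PySem.Str.split₀ (memContent memory)) with hw
  set scores := clB.values.map (fun mw => PySem.Set.len (PySem.Set.inter words mw.2))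
    with hscores
  set best := PySem.List.maxD scores (fun x => x) 0 with hbest
  by_cases h2 : best > 2
  · have h0 : 0 < best := by omega
    rw [if_pos h2]
    simp only [if_pos h0]
    set i := (PySem.List.index? scores best).getD 0 with hi
    set name := clB.keys.getD i "" with hname
    have hmemsc : best ∈ scores := by
      rcases maxD_mem_or scores with hz | hm
      · omega
      · exact hm
    have hilt : i < clB.keys.length := by
      rcases Option.isSome_iff_exists.mp (List.isSome_idxOf?.mpr hmemsc) with ⟨j, hj⟩
      have hjlt : j < scores.length := (List.idxOf?_eq_some_iff.mp hj).1
      have : PySem.List.index? scores best = some j := by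
        unfold PySem.List.index?; exact hj
      rw [hi, this]
      simp only [Option.getD_some]
      have : scores.length = clB.keys.length := by
        rw [hscores, List.length_map]
        unfold PySem.Dict.values PySem.Dict.keys
        rw [List.length_map, List.length_map]
      omega
    have hnmem : name ∈ clB.keys := by
      rw [hname, List.getD_eq_getElem _ _ hilt]
      exact List.getElem_mem hilt
    have hne : name ≠ "" := by
      apply forall₂_key_ne h
      rw [show clB.items.map Prod.fst = clB.keys from List.map_congr_left (fun x _ => rfl)]
      exact hnmem
    rw [if_pos ⟨hne, h2⟩]
    unfold PySem.Dict.modify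
    have hrel := getD_rel h name
    exact forall₂_insert h name hne _ _
      (by rw [hrel.1])
      (by
        intro w
        simp only [PySem.Set.mem_union]
        rw [memWords_append]
        exact or_congr (hrel.2 w) (by rw [hw, PySem.Set.mem_ofList]))
  · rw [if_neg h2]
    have hins : List.Forall₂ MemRel
        (clA.insert (newKey memory clA.items.length) [memory]).items
        ((clB.insert (newKey memory clB.items.length) ([memory], words)).items) := by
      rw [hlen]
      exact forall₂_insert h _ (newKey_ne_empty memory clB.items.length) [memory]
        ([memory], words) rfl
        (fun w => by rw [memWords_singleton, hw, PySem.Set.mem_ofList])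
    by_cases h0 : 0 < best
    · simp only [if_pos h0]
      rw [if_neg (by intro hc; exact h2 hc.2)]
      exact hins
    · simp only [if_neg h0]
      exact hins

theorem forall₂_proj {la : List (String × List (List (String × String)))}
    {lb : List (String × (List (List (String × String)) × PySem.Set String))}
    (h : List.Forall₂ MemRel la lb) : la = lb.map (fun kv => (kv.1, kv.2.1)) := by
  induction h with
  | nil => rfl
  | cons hab _ ih =>
    rename_i a b _ _ _
    simp only [List.map_cons, ← ih]
    rw [hab.1, hab.2.2.1]

theorem go_coupled (memories : List (List (String × String))) :
    ∀ (clA : PySem.Dict String (List (List (String × String))))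
      (clB : PySem.Dict String (List (List (String × String)) × PySem.Set String)),
    List.Forall₂ MemRel clA.items clB.items →
    List.Forall₂ MemRel (memories.foldl stepA clA).items ((goB memories clB)).items := by
  induction memories with
  | nil => intro clA clB h; exact h
  | cons m rest ih =>
    intro clA clB h
    simp only [List.foldl_cons, goB]
    exact ih _ _ (step_coupled clA clB m h)

-- ===== VERDICT (by name: the statement is the Claim_ definition above) =====
theorem cluster_memories_spec : Claim_equal_cluster_memories := by
  intro memories max_clusters _
  unfold Spec_cluster_memories cluster_memories cluster_memories_alt
  have h := go_coupled memories PySem.Dict.empty PySem.Dict.empty List.Forall₂.nil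
  by_cases hm : memories.isEmpty
  · rw [if_pos hm]
    rcases List.isEmpty_iff.mp hm with rfl
    rfl
  · rw [if_neg hm]
    exact forall₂_proj h
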